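-- pv_equiv track=rewrite | github.com/lindeb2/Apollo | PanTest/Test.py | filter_D_closest_to_middle_left
-- ===== SOURCE A (Python) =====
-- import math
--
-- def filter_D_closest_to_middle_left(candidates, value):
--     """
--     Priority D: High values prefers middle (left). (Translates to musically low parts.)
--     """
--     n = len(candidates[0])
--     target_index = math.floor((n - 1) / 2)
--
--     best_dist = float('inf')
--     b_d_good_side = False
--     scored_candidates = []
--
--     for perm in candidates:
--         index_of_val = perm.index(value)
--         good_side = index_of_val <= target_index
--         dist = abs(index_of_val - target_index)
--
--         if dist < best_dist:
--             best_dist = dist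
--             b_d_good_side = good_side
--             scored_candidates = [perm]
--         elif dist == best_dist:
--             if b_d_good_side:
--                 if good_side:
--                     scored_candidates.append(perm)
--             else:
--                 if not good_side:
--                     scored_candidates.append(perm)
--                 if good_side:
--                     scored_candidates = [perm]
--                     b_d_good_side = True
--
--
--     return scored_candidates
-- ===== SOURCE B (Python) =====
-- def filter_D_closest_to_middle_left(candidates, value):
--     """Two-pass reformulation: score every permutation once, take the minimum
--     distance, then keep the good-side (left) subset at that distance if any."""
--     target = (len(candidates[0]) - 1) // 2
--     scored = []
--     for perm in candidates:
--         i = perm.index(value)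
--         scored.append((perm, abs(i - target), i <= target))
--     best = min(d for _, d, _ in scored)
--     at_best = [(perm, good) for perm, d, good in scored if d == best]
--     has_good = any(good for _, good in at_best)
--     return [perm for perm, good in at_best if good == has_good]
-- ===== Notes on version B (the rewrite author's own statement) =====
-- stated objective: simpler
-- what changed: A's one-pass state machine (running best distance, side flag, list rebuilt and reset during the scan) is replaced by a two-pass decomposition: score every permutation once, take the minimum distance, then keep the good-side ties if any good-side tie exists, else all ties, in input order.
import Mathlib
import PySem

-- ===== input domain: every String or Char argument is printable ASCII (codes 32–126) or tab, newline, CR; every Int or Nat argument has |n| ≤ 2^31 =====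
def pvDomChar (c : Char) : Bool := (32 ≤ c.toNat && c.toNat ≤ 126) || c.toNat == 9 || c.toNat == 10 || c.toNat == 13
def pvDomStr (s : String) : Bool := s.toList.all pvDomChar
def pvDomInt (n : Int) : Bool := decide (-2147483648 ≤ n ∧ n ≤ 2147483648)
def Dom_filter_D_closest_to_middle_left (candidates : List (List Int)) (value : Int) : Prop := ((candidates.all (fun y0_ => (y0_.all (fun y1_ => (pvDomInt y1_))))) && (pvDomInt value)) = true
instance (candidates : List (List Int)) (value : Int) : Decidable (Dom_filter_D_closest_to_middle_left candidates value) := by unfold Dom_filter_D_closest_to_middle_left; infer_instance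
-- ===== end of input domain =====

-- B replaces A's one-pass state machine (best distance / side flag / rebuilt list) by a
-- two-pass decomposition: score every permutation, take the minimum distance, prefer the
-- good (left) side among the ties; objective: simpler, not faster.

-- ===== PORT A =====
-- the loop body of A: state = (best_dist : none ~ float('inf'), b_d_good_side, scored_candidates)
def pvStepA (target value : Int) (st : Option Int × Bool × List (List Int)) (perm : List Int) :
    Option Int × Bool × List (List Int) :=
  match PySem.List.index? perm value with
  | none => st            -- perm.index(value) raises ValueError: excluded by Pre_
  | some i =>
    let idx : Int := (i : Int)
    let good : Bool := decide (idx ≤ target)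
    let dist : Int := |idx - target|
    match st with
    | (none, _, _) => (some dist, good, [perm])   -- dist < float('inf') always
    | (some b, flag, scored) =>
      if dist < b then (some dist, good, [perm])
      else if dist = b then
        if flag then (some b, flag, if good then scored ++ [perm] else scored)
        else if good then (some b, true, [perm])
        else (some b, false, scored ++ [perm])
      else (some b, flag, scored)

def filter_D_closest_to_middle_left (candidates : List (List Int)) (value : Int) : List (List Int) :=
  match PySem.List.pyGet? candidates 0 with
  | none => []            -- candidates[0] raises IndexError: excluded by Pre_
  | some first =>
    -- math.floor((n - 1) / 2) = (n - 1) // 2 exactly: n = len(candidates[0]) is a small nonneg int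
    let target : Int := PySem.Int.floordiv ((first.length : Int) - 1) 2
    (candidates.foldl (pvStepA target value) (none, false, [])).2.2

-- ===== PORT B =====
def pvScore (target value : Int) (perm : List Int) : List Int × Int × Bool :=
  let i : Int := (((PySem.List.index? perm value).getD 0 : Nat) : Int)  -- some _ under Pre_
  (perm, |i - target|, decide (i ≤ target))

def filter_D_closest_to_middle_left_alt (candidates : List (List Int)) (value : Int) : List (List Int) :=
  match PySem.List.pyGet? candidates 0 with
  | none => []            -- candidates[0] raises IndexError: excluded by Pre_
  | some first =>
    let target : Int := PySem.Int.floordiv ((first.length : Int) - 1) 2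
    let scored := candidates.map (pvScore target value)
    let best : Int := (PySem.List.min? (scored.map (fun t => t.2.1)) (fun x => x)).getD 0
    let atBest := (scored.filter (fun t => t.2.1 == best)).map (fun t => (t.1, t.2.2))
    let hasGood := atBest.any (fun p => p.2)
    (atBest.filter (fun p => p.2 == hasGood)).map (fun p => p.1)

-- ===== PRECONDITION & SPEC =====
-- Pre_ excludes exactly the inputs where A raises: empty candidates (IndexError on
-- candidates[0]) and a permutation not containing value (ValueError on perm.index(value)).
def Pre_filter_D_closest_to_middle_left (candidates : List (List Int)) (value : Int) : Prop :=
  candidates ≠ [] ∧ ∀ perm ∈ candidates, value ∈ perm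
instance (candidates : List (List Int)) (value : Int) : Decidable (Pre_filter_D_closest_to_middle_left candidates value) := by unfold Pre_filter_D_closest_to_middle_left; infer_instance

def pvWitness_filter_D_closest_to_middle_left : List (List Int) × Int := ([[0, 1, 2], [2, 0, 1], [1, 2, 0]], 2)

def Spec_filter_D_closest_to_middle_left (candidates : List (List Int)) (value : Int) (out : List (List Int)) : Prop := out = filter_D_closest_to_middle_left_alt candidates value
instance (candidates : List (List Int)) (value : Int) (out : List (List Int)) : Decidable (Spec_filter_D_closest_to_middle_left candidates value out) := by unfold Spec_filter_D_closest_to_middle_left; infer_instance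

-- ===== CLAIM (what is proved, stated in full; the proofs are below) =====
def Claim_equal_filter_D_closest_to_middle_left : Prop := ∀ (candidates : List (List Int)) (value : Int), Dom_filter_D_closest_to_middle_left candidates value → Pre_filter_D_closest_to_middle_left candidates value → Spec_filter_D_closest_to_middle_left candidates value (filter_D_closest_to_middle_left candidates value)

-- ===== LEMMAS AND PROOFS =====

-- the state A's loop reaches after a nonempty scored prefix s whose minimum distance is b
def pvPost (s : List (List Int × Int × Bool)) (b : Int) : Option Int × Bool × List (List Int) :=
  let atB := s.filter (fun t => t.2.1 == b)
  let hg := atB.any (fun t => t.2.2)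
  (some b, hg, (atB.filter (fun t => t.2.2 == hg)).map (fun t => t.1))

lemma pv_foldl_min_le_init (l : List Int) (a : Int) : l.foldl min a ≤ a := by
  induction l generalizing a with
  | nil => simp
  | cons x t ih => exact le_trans (ih (min a x)) (min_le_left a x)

lemma pv_foldl_min_le_mem (l : List Int) (a x : Int) (hx : x ∈ l) : l.foldl min a ≤ x := by
  induction l generalizing a with
  | nil => simp at hx
  | cons y t ih =>
    rcases List.mem_cons.1 hx with rfl | h
    · exact le_trans (pv_foldl_min_le_init t (min a x)) (min_le_right a x)
    · exact ih (min a y) h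

-- one step of A's loop, seen from the invariant state
lemma pv_step_post (target value : Int) (p : List Int) (hp : value ∈ p)
    (s : List (List Int × Int × Bool)) (b : Int) (hmin : ∀ t ∈ s, b ≤ t.2.1) :
    pvStepA target value (pvPost s b) p
      = pvPost (s ++ [pvScore target value p]) (min b (pvScore target value p).2.1) := by
  obtain ⟨i, hi⟩ := Option.isSome_iff_exists.1 ((PySem.List.index?_isSome_iff p value).2 hp)
  have hi' : List.idxOf? value p = some i := by
    rw [← PySem.List.index?_eq_idxOf?]; exact hi
  have hsc : pvScore target value p = (p, |(i : Int) - target|, decide ((i : Int) ≤ target)) := by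
    simp [pvScore, PySem.List.index?_eq_idxOf?, hi']
  rw [hsc]
  simp only [pvStepA, PySem.List.index?_eq_idxOf?, hi', pvPost]
  generalize hG : decide ((i : Int) ≤ target) = g
  generalize hD : |(i : Int) - target| = d
  clear hG hD hsc hi hi' hp
  rcases lt_trichotomy d b with hlt | heq | hgt
  · have hmm : min b d = d := by omega
    have hfil : ∀ P : List Int × Int × Bool → Bool,
        s.filter (fun t => P t && (t.2.1 == d)) = [] := by
      intro P
      refine List.filter_eq_nil_iff.2 ?_
      intro t ht
      have := hmin t ht
      simp only [Bool.and_eq_true, beq_iff_eq]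
      omega
    have hfil' : s.filter (fun t => (t.2.1 == d)) = [] := by
      refine List.filter_eq_nil_iff.2 ?_
      intro t ht
      have := hmin t ht
      simp only [beq_iff_eq]; omega
    simp [hlt, hmm, List.filter_append, hfil, hfil']
  · subst heq
    have hmm : min d d = d := by omega
    cases hA : s.any (fun a => (a.2.1 == d) && a.2.2) with
    | true =>
      cases g with
      | true => simp [hmm, List.filter_append, List.filter_filter, List.any_filter, List.any_append, hA]
      | false => simp [hmm, List.filter_append, List.filter_filter, List.any_filter, List.any_append, hA]
    | false =>
      have hAllBad : ∀ t ∈ s, t.2.1 = d → t.2.2 = false := by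
        intro t ht htd
        have := List.any_eq_false.1 hA t ht
        simp only [Bool.and_eq_true, beq_iff_eq, not_and, Bool.not_eq_true] at this
        exact this htd
      cases g with
      | true =>
        have hfil2 : s.filter (fun a => a.2.2 && (a.2.1 == d)) = [] := by
          refine List.filter_eq_nil_iff.2 ?_
          intro t ht
          simp only [Bool.and_eq_true, beq_iff_eq, not_and]
          intro h2 h1
          exact absurd (hAllBad t ht h1) (by simp [h2])
        simp [hmm, List.filter_append, List.filter_filter, List.any_filter, List.any_append, hA, hfil2]
      | false => simp [hmm, List.filter_append, List.filter_filter, List.any_filter, List.any_append, hA]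
  · have hmm : min b d = b := by omega
    have hne : (d == b) = false := by simp; omega
    have hnlt : ¬ d < b := by omega
    have hned : ¬ d = b := by omega
    simp [hnlt, hned, hmm, List.filter_append, List.filter_filter, List.any_filter, List.any_append, hne]

-- A's whole loop lands in the invariant state
lemma pv_fold_eq (target value : Int) (c : List Int) (cs : List (List Int))
    (h : ∀ p ∈ c :: cs, value ∈ p) :
    (c :: cs).foldl (pvStepA target value) (none, false, [])
      = pvPost ((c :: cs).map (pvScore target value))
          ((cs.map (fun p => (pvScore target value p).2.1)).foldl min (pvScore target value c).2.1) := by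
  induction cs using List.reverseRecOn with
  | nil =>
    obtain ⟨i, hi⟩ := Option.isSome_iff_exists.1
      ((PySem.List.index?_isSome_iff c value).2 (h c (by simp)))
    have hi' : List.idxOf? value c = some i := by
      rw [← PySem.List.index?_eq_idxOf?]; exact hi
    simp [pvStepA, pvScore, pvPost, PySem.List.index?_eq_idxOf?, hi']
  | append_singleton cs p ih =>
    have h' : ∀ q ∈ c :: cs, value ∈ q := by
      intro q hq
      apply h; simp only [List.mem_cons, List.mem_append] at hq ⊢; tauto
    have hp : value ∈ p := h p (by simp)
    have hrw : c :: (cs ++ [p]) = (c :: cs) ++ [p] := by simp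
    rw [hrw, List.foldl_append, ih h']
    simp only [List.foldl_cons, List.foldl_nil]
    rw [pv_step_post target value p hp _ _ ?hmin]
    · simp [List.map_append, List.foldl_append]
    · intro t ht
      simp only [List.mem_map, List.mem_cons] at ht
      obtain ⟨q, hq, rfl⟩ := ht
      rcases hq with rfl | hq'
      · exact pv_foldl_min_le_init _ _
      · exact pv_foldl_min_le_mem _ _ _ (List.mem_map_of_mem hq')

-- ===== VERDICT (by name: the statement is the Claim_ definition above) =====
theorem filter_D_closest_to_middle_left_spec : Claim_equal_filter_D_closest_to_middle_left := by
  intro candidates value _hdom hpre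
  obtain ⟨hne, hall⟩ := hpre
  unfold Spec_filter_D_closest_to_middle_left
  cases candidates with
  | nil => exact absurd rfl hne
  | cons c cs =>
    simp only [filter_D_closest_to_middle_left, filter_D_closest_to_middle_left_alt,
      PySem.List.pyGet?_zero_cons]
    rw [pv_fold_eq _ value c cs hall]
    have hmap : ((c :: cs).map (pvScore (PySem.Int.floordiv ((c.length : Int) - 1) 2) value)).map (fun t => t.2.1)
        = (pvScore (PySem.Int.floordiv ((c.length : Int) - 1) 2) value c).2.1
          :: cs.map (fun p => (pvScore (PySem.Int.floordiv ((c.length : Int) - 1) 2) value p).2.1) := by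
      simp [List.map_map, Function.comp]
    rw [hmap, PySem.List.min?_id_cons]
    simp [pvPost, List.filter_map, List.any_map, Function.comp, List.map_map]
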